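-- pv_equiv track=rewrite | github.com/jcraig949jfi/Prometheus | ignis/src/review_watchman.py | _split_runs
-- ===== SOURCE A (Python) =====
-- def _split_runs(digests: list[dict]) -> list[list[dict]]:
--     """Split digest history into runs. A new run starts when max_generation goes backward."""
--     if not digests:
--         return []
--     runs: list[list[dict]] = []
--     current: list[dict] = [digests[0]]
--     for i in range(1, len(digests)):
--         prev_gen = int(digests[i - 1].get("max_generation") or 0)
--         curr_gen = int(digests[i].get("max_generation") or 0)
--         if curr_gen < prev_gen:
--             runs.append(current)
--             current = [digests[i]]
--         else:
--             current.append(digests[i])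
--     if current:
--         runs.append(current)
--     return runs
-- ===== SOURCE B (Python) =====
-- def _split_runs(digests: list[dict]) -> list[list[dict]]:
--     """Split digest history into runs: precompute generations, find break indices, slice."""
--     if not digests:
--         return []
--     gens = [int(d.get("max_generation") or 0) for d in digests]
--     breaks = [i for i in range(1, len(gens)) if gens[i] < gens[i - 1]]
--     cuts = [0] + breaks + [len(digests)]
--     return [digests[a:b] for a, b in zip(cuts, cuts[1:])]
-- ===== Notes on version B (the rewrite author's own statement) =====
-- stated objective: alternative
-- what changed: Replaces A's single stateful pass maintaining runs/current accumulators with a precompute-then-slice decomposition: map digests to a generations list, collect the break indices where the generation drops, and slice the input between consecutive cut points.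
import Mathlib
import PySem

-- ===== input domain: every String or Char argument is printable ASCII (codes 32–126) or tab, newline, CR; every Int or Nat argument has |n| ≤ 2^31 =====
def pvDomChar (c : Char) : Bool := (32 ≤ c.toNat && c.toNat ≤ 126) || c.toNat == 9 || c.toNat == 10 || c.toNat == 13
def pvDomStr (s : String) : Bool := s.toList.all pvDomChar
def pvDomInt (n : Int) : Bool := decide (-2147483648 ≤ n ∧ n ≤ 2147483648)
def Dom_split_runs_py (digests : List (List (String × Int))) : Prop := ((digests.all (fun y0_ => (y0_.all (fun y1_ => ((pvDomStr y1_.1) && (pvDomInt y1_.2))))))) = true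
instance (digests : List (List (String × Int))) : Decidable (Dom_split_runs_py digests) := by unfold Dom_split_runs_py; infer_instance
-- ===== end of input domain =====

-- B replaces A's running runs/current accumulator by a precompute-then-slice decomposition
-- (generation list, break indices, slices between cut points); objective: alternative, same O(n) cost.

-- ===== PORT A =====
-- int(d.get("max_generation") or 0): values are ints, so `or 0` maps None and 0 to 0 — getD 0 is exact
def pvGen (d : List (String × Int)) : Int := (d.lookup "max_generation").getD 0

-- the body of A's for-loop (state = (runs, current))
def pvStep (digests : List (List (String × Int)))
    (st : List (List (List (String × Int))) × List (List (String × Int))) (i : Int) :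
    List (List (List (String × Int))) × List (List (String × Int)) :=
  let prev_gen := pvGen (PySem.List.pyGetD digests (i - 1) [])
  let curr_gen := pvGen (PySem.List.pyGetD digests i [])
  if curr_gen < prev_gen then
    (st.1 ++ [st.2], [PySem.List.pyGetD digests i []])
  else
    (st.1, st.2 ++ [PySem.List.pyGetD digests i []])

def split_runs_py (digests : List (List (String × Int))) : List (List (List (String × Int))) :=
  match digests with
  | [] => []
  | d0 :: _ =>
    let st := (PySem.List.pyRange 1 (digests.length : Int) 1).foldl (pvStep digests) ([], [d0])
    if st.2 ≠ [] then st.1 ++ [st.2] else st.1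

-- ===== PORT B =====
-- the break test `gens[i] < gens[i-1]`
def pvBrk (gens : List Int) (i : Int) : Bool :=
  decide (PySem.List.pyGetD gens i 0 < PySem.List.pyGetD gens (i - 1) 0)

def split_runs_py_alt (digests : List (List (String × Int))) : List (List (List (String × Int))) :=
  if digests = [] then []
  else
    let gens := digests.map pvGen
    let breaks := (PySem.List.pyRange 1 (gens.length : Int) 1).filter (pvBrk gens)
    let cuts := (0 : Int) :: (breaks ++ [(digests.length : Int)])
    (cuts.zip cuts.tail).map (fun ab => PySem.List.slice digests (some ab.1) (some ab.2))

-- ===== PRECONDITION & SPEC =====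
def Spec_split_runs_py (digests : List (List (String × Int))) (out : List (List (List (String × Int)))) : Prop := out = split_runs_py_alt digests
instance (digests : List (List (String × Int))) (out : List (List (List (String × Int)))) : Decidable (Spec_split_runs_py digests out) := by unfold Spec_split_runs_py; infer_instance

-- ===== CLAIM (what is proved, stated in full; the proofs are below) =====
def Claim_equal_split_runs_py : Prop := ∀ (digests : List (List (String × Int))), Dom_split_runs_py digests → Spec_split_runs_py digests (split_runs_py digests)

-- ===== LEMMAS AND PROOFS =====

-- zip-with-tail over an appended cut point
lemma pv_zip_tail_concat {β : Type} (g : Int × Int → β) :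
    ∀ (c : List Int) (hc : c ≠ []) (x : Int),
      (((c ++ [x]).zip (c ++ [x]).tail).map g) = ((c.zip c.tail).map g) ++ [g (c.getLast hc, x)] := by
  intro c
  induction c with
  | nil => intro hc; exact absurd rfl hc
  | cons a c' ih =>
    intro _ x
    cases c' with
    | nil => simp
    | cons b t =>
      have := ih (by simp) x
      simp only [List.cons_append, List.zip_cons_cons, List.tail_cons, List.map_cons] at this ⊢
      rw [this]
      simp [List.getLast]

lemma pv_slice_singleton (xs : List (List (String × Int))) (k : Nat) (hk : k < xs.length) :
    PySem.List.slice xs (some (k : Int)) (some ((k : Int) + 1)) = [xs[k]] := by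
  have h1 : ((k : Int) + 1) = ((k + 1 : Nat) : Int) := by push_cast; ring
  rw [h1, PySem.List.slice_toNat xs (by positivity) (by positivity)]
  simp only [Int.toNat_natCast]
  have h2 : k + 1 - k = 1 := by omega
  rw [h2, List.take_one, List.head?_drop, List.getElem?_eq_getElem hk]
  rfl

lemma pv_slice_extend (xs : List (List (String × Int))) (a : Int) (k : Nat)
    (ha : 0 ≤ a) (hak : a ≤ (k : Int)) (hk : k < xs.length) :
    PySem.List.slice xs (some a) (some ((k : Int) + 1)) =
      PySem.List.slice xs (some a) (some (k : Int)) ++ [xs[k]] := by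
  have h1 : ((k : Int) + 1) = ((k + 1 : Nat) : Int) := by push_cast; ring
  rw [h1, PySem.List.slice_toNat xs ha (by positivity), PySem.List.slice_toNat xs ha (by positivity)]
  simp only [Int.toNat_natCast]
  have hat : a.toNat ≤ k := by omega
  have hkd : k - a.toNat < (xs.drop a.toNat).length := by
    rw [List.length_drop]; omega
  have h2 : k + 1 - a.toNat = (k - a.toNat) + 1 := by omega
  rw [h2, List.take_add_one]
  have : (xs.drop a.toNat)[k - a.toNat]? = some xs[k] := by
    rw [List.getElem?_drop]
    rw [List.getElem?_eq_getElem (by omega)]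
    congr 1
    congr 1
    omega
  simp [this]

-- every break index produced on the prefix of length k lies in [1, k)
lemma pv_breaks_mem (gens : List Int) (k : Nat) (x : Int)
    (hx : x ∈ (PySem.List.pyRange 1 (k : Int) 1).filter (pvBrk gens)) : 1 ≤ x ∧ x < (k : Int) :=
  PySem.List.mem_pyRange_one.mp (List.mem_of_mem_filter hx)

lemma pv_lastD_eq (l : List Int) (hl : l ≠ []) : l.getLastD 0 = l.getLast hl := by
  rw [List.getLastD_eq_getLast?, List.getLast?_eq_some_getLast hl, Option.getD_some]

lemma pv_lastD_cons0 (br : List Int) : (((0:Int)) :: br).getLast (by simp) = br.getLastD 0 := by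
  cases br with
  | nil => simp
  | cons b t => rw [List.getLast_cons (by simp), pv_lastD_eq (b::t) (by simp)]

-- the trailing cut point is in [0, k)
lemma pv_lastCut_bounds (gens : List Int) (k : Nat) (hk : 1 ≤ k) :
    0 ≤ ((PySem.List.pyRange 1 (k : Int) 1).filter (pvBrk gens)).getLastD 0 ∧
    ((PySem.List.pyRange 1 (k : Int) 1).filter (pvBrk gens)).getLastD 0 < (k : Int) := by
  by_cases h : (PySem.List.pyRange 1 (k : Int) 1).filter (pvBrk gens) = []
  · rw [h]; constructor
    · simp
    · simpa using (by exact_mod_cast hk : (1:Int) ≤ (k:Int))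
  · rw [pv_lastD_eq _ h]
    have := pv_breaks_mem gens k _ (List.getLast_mem h)
    exact ⟨by omega, by omega⟩

-- A's loop state after the first k elements, in terms of B's cut points
lemma pv_inv (d0 : List (String × Int)) (rest : List (List (String × Int))) :
    ∀ (k : Nat), 1 ≤ k → k ≤ (d0 :: rest).length →
    (PySem.List.pyRange 1 (k : Int) 1).foldl (pvStep (d0 :: rest)) ([], [d0]) =
      ((((0 : Int) :: (PySem.List.pyRange 1 (k : Int) 1).filter (pvBrk ((d0 :: rest).map pvGen))).zip
          (((0 : Int) :: (PySem.List.pyRange 1 (k : Int) 1).filter (pvBrk ((d0 :: rest).map pvGen))).tail)).map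
            (fun ab => PySem.List.slice (d0 :: rest) (some ab.1) (some ab.2)),
        PySem.List.slice (d0 :: rest)
          (some (((PySem.List.pyRange 1 (k : Int) 1).filter (pvBrk ((d0 :: rest).map pvGen))).getLastD 0))
          (some (k : Int))) := by
  intro k hk
  induction k, hk using Nat.le_induction with
  | base =>
    intro _
    rw [show ((1:Nat):Int) = 1 from rfl, PySem.List.pyRange_one_eq_nil (le_refl 1)]
    simp only [List.foldl_nil, List.filter_nil]
    have h0 := pv_slice_singleton (d0 :: rest) 0 (by simp)
    simp only [Nat.cast_zero, zero_add] at h0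
    simp [h0]
  | succ k hk1 ih =>
    intro hkn
    have hkn' : k ≤ (d0 :: rest).length := by omega
    have hkL : k < (d0 :: rest).length := by omega
    have hcast : (((k+1 : Nat)) : Int) = (k : Int) + 1 := by push_cast; ring
    have hk1' : (1 : Int) ≤ (k : Int) := by exact_mod_cast hk1
    rw [hcast, PySem.List.pyRange_one_succ_right hk1', List.foldl_append, List.filter_append,
        ih hkn']
    simp only [List.foldl_cons, List.foldl_nil, List.filter_cons, List.filter_nil]
    -- identify the two break tests
    have hget : PySem.List.pyGetD (d0 :: rest) (k : Int) [] = (d0 :: rest)[k] := by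
      rw [PySem.List.pyGetD_eq_getElem _ _ (by positivity) (by exact_mod_cast hkL)]
      simp
    have hgetp : PySem.List.pyGetD (d0 :: rest) ((k : Int) - 1) [] = (d0 :: rest)[k-1] := by
      have h1 : (k : Int) - 1 = ((k - 1 : Nat) : Int) := by omega
      rw [h1, PySem.List.pyGetD_eq_getElem _ _ (by positivity)
        (by exact_mod_cast (show k - 1 < (d0 :: rest).length by omega))]
      simp
    have hkLm : k < ((d0 :: rest).map pvGen).length := by simpa using hkL
    have hgens : PySem.List.pyGetD ((d0 :: rest).map pvGen) (k : Int) 0 = pvGen ((d0 :: rest)[k]) := by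
      rw [PySem.List.pyGetD_eq_getElem _ _ (by positivity) (by exact_mod_cast hkLm)]
      simp only [Int.toNat_natCast]
      have h2 := List.getElem_map (l := d0 :: rest) (f := pvGen) (i := k) (h := by simpa using hkL)
      simpa using h2
    have hgensp : PySem.List.pyGetD ((d0 :: rest).map pvGen) ((k : Int) - 1) 0 = pvGen ((d0 :: rest)[k-1]) := by
      have h1 : (k : Int) - 1 = ((k - 1 : Nat) : Int) := by omega
      rw [h1, PySem.List.pyGetD_eq_getElem _ _ (by positivity)
        (by exact_mod_cast (show k - 1 < ((d0 :: rest).map pvGen).length by simpa using (show k - 1 < (d0 :: rest).length by omega)))]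
      simp only [Int.toNat_natCast]
      have h2 := List.getElem_map (l := d0 :: rest) (f := pvGen) (i := k - 1) (h := by simpa using (show k - 1 < (d0 :: rest).length by omega))
      simpa using h2
    have hbnd := pv_lastCut_bounds ((d0 :: rest).map pvGen) k hk1
    have hz := pv_zip_tail_concat (fun ab => PySem.List.slice (d0 :: rest) (some ab.1) (some ab.2))
      ((0 : Int) :: (PySem.List.pyRange 1 (k : Int) 1).filter (pvBrk ((d0 :: rest).map pvGen))) (by simp) (k : Int)
    rw [pv_lastD_cons0] at hz
    simp only [pvStep, pvBrk, hget, hgetp, hgens, hgensp, decide_eq_true_eq]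
    by_cases hlt : pvGen ((d0 :: rest)[k]) < pvGen ((d0 :: rest)[k-1])
    · -- break at k: a new run starts
      rw [if_pos hlt, if_pos hlt]
      refine Prod.ext ?_ ?_
      · show _ ++ _ = _
        rw [← List.cons_append, hz]
      · show ([(d0 :: rest)[k]] : List (List (String × Int))) = _
        rw [List.getLastD_concat, pv_slice_singleton (d0 :: rest) k hkL]
    · rw [if_neg hlt, if_neg hlt]
      simp only [List.append_nil]
      refine Prod.ext rfl ?_
      show _ ++ _ = _
      rw [pv_slice_extend (d0 :: rest) _ k hbnd.1 (by omega) hkL]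
-- ===== VERDICT (by name: the statement is the Claim_ definition above) =====
theorem split_runs_py_spec : Claim_equal_split_runs_py := by
  unfold Claim_equal_split_runs_py
  intro digests _
  unfold Spec_split_runs_py
  cases digests with
  | nil => rfl
  | cons d0 rest =>
    have hn1 : 1 ≤ (d0 :: rest).length := by simp
    have hinv := pv_inv d0 rest (d0 :: rest).length hn1 (le_refl _)
    have hbnd := pv_lastCut_bounds ((d0 :: rest).map pvGen) (d0 :: rest).length hn1
    have hz := pv_zip_tail_concat (fun ab => PySem.List.slice (d0 :: rest) (some ab.1) (some ab.2))
      ((0 : Int) :: (PySem.List.pyRange 1 ((d0 :: rest).length : Int) 1).filter (pvBrk ((d0 :: rest).map pvGen)))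
      (by simp) ((d0 :: rest).length : Int)
    rw [pv_lastD_cons0] at hz
    -- the final current run is nonempty
    have hne : PySem.List.slice (d0 :: rest)
        (some (((PySem.List.pyRange 1 ((d0 :: rest).length : Int) 1).filter (pvBrk ((d0 :: rest).map pvGen))).getLastD 0))
        (some ((d0 :: rest).length : Int)) ≠ [] := by
      intro hempty
      rw [PySem.List.slice_toNat _ hbnd.1 (by positivity)] at hempty
      have hlen := congrArg List.length hempty
      simp only [List.length_take, List.length_drop, List.length_nil, Int.toNat_natCast] at hlen
      have hb2 := hbnd.2
      omega
    simp only [split_runs_py, split_runs_py_alt, List.length_map, hinv, if_neg (List.cons_ne_nil d0 rest)]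
    rw [if_pos hne]
    simp only [← List.cons_append, hz]
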